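-- pv_equiv track=rewrite | github.com/loadlost/Mylibrary | main.py | compare_and_merge_keys
-- ===== SOURCE A (Python) =====
-- def compare_and_merge_keys(author_dict):
--     # Сравнивает и объединяет ключи словаря авторов на основе фамилий.
--     # Принимает словарь 'author_dict' - словарь авторов.
--     # Возвращает словарь 'merged_dict' - объединенный словарь авторов.
--
--     merged_dict = {}
--     while author_dict:
--         key1, books1 = author_dict.popitem()  # Извлекает ключ и соответствующее множество книг
--         author_last_names = set(author.split()[-1] for author in key1.split(', '))  # Извлекает фамилии из ключа
--         matching_keys = [key2 for key2 in author_dict.keys() if set(author.split()[-1] for author in key2.split(', '))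
--                          == author_last_names]  # Ищет ключи с совпадающими фамилиями
--         if matching_keys:
--             merged_books = books1.union(*[author_dict[key] for key in matching_keys])  # Объединяет множества книг
--             for key in matching_keys:
--                 del author_dict[key]  # Удаляет совпадающие ключи из исходного словаря
--             merged_dict[key1] = merged_books  # Добавляет объединенное множество в новый словарь
--         else:
--             merged_dict[key1] = books1  # Если совпадений нет, добавляет множество в новый словарь
--
--     return merged_dict  # Возвращает объединенный словарь авторов
-- ===== SOURCE B (Python) =====
-- def _name_key(key):
--     # canonical, hashable form of the set of author last names in a key
--     return tuple(sorted(set(a.split()[-1] for a in key.split(', '))))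
--
--
-- def compare_and_merge_keys(author_dict):
--     # One pass: bucket the (key, books) pairs by their last-name set; then emit,
--     # in reverse-insertion order of the classes, the last key of each class with
--     # the union of its book sets.  (Does not mutate author_dict, unlike the original.)
--     groups = {}
--     for key, books in author_dict.items():
--         groups.setdefault(_name_key(key), []).append((key, books))
--     merged = {}
--     for nm in dict.fromkeys(_name_key(key) for key in reversed(author_dict)):
--         members = groups[nm]
--         key1, merged_books = members[-1]
--         for _, b in members[:-1]:
--             merged_books = merged_books | b
--         merged[key1] = merged_books
--     return merged
-- ===== Notes on version B (the rewrite author's own statement) =====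
-- stated objective: faster
-- what changed: A repeatedly pops the last dict item and rescans and deletes over all remaining keys per step; B makes one grouping pass that buckets entries by the sorted set of author last names and then emits each bucket once in reverse-insertion order of its last key, unioning the book sets (B does not mutate the argument dict, A consumes it in place).
import Mathlib
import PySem

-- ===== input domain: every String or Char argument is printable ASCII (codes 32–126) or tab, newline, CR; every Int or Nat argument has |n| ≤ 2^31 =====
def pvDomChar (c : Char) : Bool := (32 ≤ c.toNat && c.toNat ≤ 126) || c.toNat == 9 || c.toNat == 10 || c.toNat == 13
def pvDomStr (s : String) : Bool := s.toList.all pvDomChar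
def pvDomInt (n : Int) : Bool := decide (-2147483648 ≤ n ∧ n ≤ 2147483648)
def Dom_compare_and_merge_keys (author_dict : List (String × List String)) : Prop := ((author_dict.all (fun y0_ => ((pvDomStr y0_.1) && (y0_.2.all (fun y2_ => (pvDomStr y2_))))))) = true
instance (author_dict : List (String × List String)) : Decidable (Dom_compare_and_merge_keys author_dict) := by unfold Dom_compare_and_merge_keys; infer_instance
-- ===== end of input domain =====

-- B replaces A's quadratic pop-and-rescan loop by a single grouping pass keyed by the
-- sorted set of last names (equivalence proved about the RETURN value only: A consumes
-- its argument dict in place via popitem/del, B does not mutate it).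

-- ===== PORT A =====
-- set(author.split()[-1] for author in key.split(', '))
def pvA_lastNames (key : String) : PySem.Set String :=
  PySem.Set.ofList (((PySem.Str.split? key ", ").getD []).map
    (fun author => PySem.List.pyGetD (PySem.Str.split₀ author) (-1) ""))

-- termination helpers for the while-loop of A (cited by decreasing_by)
def pvA_size_erase_le {κ ν : Type} [BEq κ] (d : PySem.Dict κ ν) (k : κ) : (d.erase k).size ≤ d.size := by
  simp [PySem.Dict.erase, PySem.Dict.size]; exact List.length_filter_le _ _

def pvA_size_foldl_erase_le {κ ν : Type} [BEq κ] (ks : List κ) (d : PySem.Dict κ ν) :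
    (ks.foldl (fun dd k => dd.erase k) d).size ≤ d.size := by
  induction ks generalizing d with
  | nil => simp
  | cons k ks ih => exact le_trans (ih (d.erase k)) (pvA_size_erase_le d k)

-- the 'while author_dict:' loop; popitem() takes the LAST item
def pvA_go (d merged : PySem.Dict String (List String)) : PySem.Dict String (List String) :=
  match _h : d.items.getLast? with
  | none => merged
  | some (key1, books1) =>
    let init : PySem.Dict String (List String) := PySem.Dict.mk d.items.dropLast
    let author_last_names := pvA_lastNames key1
    let matching_keys := init.keys.filter (fun key2 => PySem.Set.equal (pvA_lastNames key2) author_last_names)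
    if matching_keys ≠ [] then
      let merged_books := matching_keys.foldl (fun s key => PySem.Set.union s (init.getD key [])) books1
      pvA_go (matching_keys.foldl (fun dd key => dd.erase key) init) (merged.insert key1 merged_books)
    else
      pvA_go init (merged.insert key1 books1)
termination_by d.size
decreasing_by
  all_goals
    have hne : d.items ≠ [] := by intro hn; rw [hn] at _h; simp at _h
    have hlen : 0 < d.items.length := List.length_pos_iff.mpr hne
  · exact lt_of_le_of_lt (pvA_size_foldl_erase_le _ _)
      (by simp [PySem.Dict.size]; omega)
  · simp [PySem.Dict.size]; omega

def compare_and_merge_keys (author_dict : List (String × List String)) : List (String × List String) :=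
  (pvA_go (PySem.Dict.mk author_dict) (PySem.Dict.mk [])).items

-- ===== PORT B =====
-- tuple(sorted(set(a.split()[-1] for a in key.split(', '))))
def pvB_nameKey (key : String) : List String :=
  PySem.List.sorted
    (PySem.Set.ofList (((PySem.Str.split? key ", ").getD []).map
      (fun a => PySem.List.pyGetD (PySem.Str.split₀ a) (-1) "")))
    (fun x => x) false

def compare_and_merge_keys_alt (author_dict : List (String × List String)) : List (String × List String) :=
  let groups := author_dict.foldl
    (fun g p => g.modify (pvB_nameKey p.1) [] (fun ms => ms ++ [p]))
    (PySem.Dict.mk [])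
  let order := PySem.List.dedup (author_dict.reverse.map (fun p => pvB_nameKey p.1))
  let merged := order.foldl
    (fun m nm =>
      let members := groups.getD nm []
      let last := PySem.List.pyGetD members (-1) ("", [])
      let merged_books := (PySem.List.slice members none (some (-1))).foldl
        (fun s q => PySem.Set.union s q.2) last.2
      m.insert last.1 merged_books)
    (PySem.Dict.mk [])
  merged.items

-- ===== PRECONDITION & SPEC =====
-- Pre_ states the dict/set representation invariant of the argument: distinct keys, which
-- every association list encoding a Python dict satisfies; and it excludes keys in which
-- some ', '-separated author part has no whitespace-separated word, on which Python A
-- raises IndexError taking the last word of that part.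
def Pre_compare_and_merge_keys (author_dict : List (String × List String)) : Prop :=
  (author_dict.map Prod.fst).Nodup ∧
  ∀ p ∈ author_dict, ∀ a ∈ (PySem.Str.split? p.1 ", ").getD [], PySem.Str.split₀ a ≠ []
instance (author_dict : List (String × List String)) : Decidable (Pre_compare_and_merge_keys author_dict) := by
  unfold Pre_compare_and_merge_keys; infer_instance

def pvWitness_compare_and_merge_keys : (List (String × List String)) :=
  [("John Smith", ["book1"]), ("Jane Smith", ["book2"]), ("Ann Lee, Bo Kim", [])]

def Spec_compare_and_merge_keys (author_dict : List (String × List String)) (out : List (String × List String)) : Prop := out = compare_and_merge_keys_alt author_dict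
instance (author_dict : List (String × List String)) (out : List (String × List String)) : Decidable (Spec_compare_and_merge_keys author_dict out) := by unfold Spec_compare_and_merge_keys; infer_instance

-- ===== CLAIM (what is proved, stated in full; the proofs are below) =====
def Claim_equal_compare_and_merge_keys : Prop := ∀ (author_dict : List (String × List String)), Dom_compare_and_merge_keys author_dict → Pre_compare_and_merge_keys author_dict → Spec_compare_and_merge_keys author_dict (compare_and_merge_keys author_dict)

-- ===== LEMMAS AND PROOFS =====

def pvMembers (d : List (String × List String)) (c : List String) : List (String × List String) :=
  d.filter (fun p => pvB_nameKey p.1 == c)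

def pvEmit (ms : List (String × List String)) : String × List String :=
  ((PySem.List.pyGetD ms (-1) ("", [])).1,
   (PySem.List.slice ms none (some (-1))).foldl (fun s q => PySem.Set.union s q.2)
     (PySem.List.pyGetD ms (-1) ("", [])).2)

def pvTarget (d : List (String × List String)) : List (String × List String) :=
  (PySem.List.dedup (d.reverse.map (fun p => pvB_nameKey p.1))).map (fun c => pvEmit (pvMembers d c))

theorem pvKeyeq (x y : String) :
    PySem.Set.equal (pvA_lastNames x) (pvA_lastNames y) = (pvB_nameKey x == pvB_nameKey y) := by
  have hB : ∀ z, pvB_nameKey z = PySem.List.sorted (pvA_lastNames z) (fun x => x) false := fun _ => rfl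
  rw [Bool.eq_iff_iff, PySem.Set.equal_iff, beq_iff_eq, hB, hB,
    PySem.List.sorted_id_eq_sorted_id_iff_perm]
  exact (List.perm_ext_iff_of_nodup (PySem.Set.nodup_ofList _) (PySem.Set.nodup_ofList _)).symm

theorem pvOfListFilter {α : Type} [BEq α] [LawfulBEq α] (xs : List α) (q : α → Bool) :
    PySem.Set.ofList (xs.filter q) = (PySem.Set.ofList xs).filter q := by
  induction xs with
  | nil => rfl
  | cons x xs ih =>
    by_cases hq : q x
    · rw [List.filter_cons_of_pos hq, PySem.Set.ofList_cons, PySem.Set.ofList_cons, ih,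
        PySem.Set.discard, PySem.Set.discard, List.filter_cons_of_pos hq, List.filter_filter, List.filter_filter]
      congr 1; apply List.filter_congr; intro a _; rw [Bool.and_comm]
    · rw [List.filter_cons_of_neg (by simpa using hq), PySem.Set.ofList_cons, ih, PySem.Set.discard,
        List.filter_cons_of_neg (by simpa using hq), List.filter_filter]
      apply List.filter_congr; intro a _
      by_cases hax : a = x
      · subst hax; simp_all
      · simp [hax]

theorem pvFoldlErase (ks : List String) (l : List (String × List String)) :
    (ks.foldl (fun dd k => dd.erase k) (PySem.Dict.mk l)).items
      = l.filter (fun p => !(ks.contains p.1)) := by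
  induction ks generalizing l with
  | nil => simp
  | cons k ks ih =>
    simp only [List.foldl_cons]
    have : (PySem.Dict.mk l).erase k = PySem.Dict.mk (l.filter (fun p => !(p.1 == k))) := rfl
    rw [this, ih, List.filter_filter]
    apply List.filter_congr; intro p _
    rw [List.contains_cons, Bool.not_or, Bool.and_comm]

theorem pvGroupsGetD (ad : List (String × List String)) (c : List String) :
    ((ad.foldl (fun g p => g.modify (pvB_nameKey p.1) [] (fun ms => ms ++ [p])) (PySem.Dict.mk [])).getD c [])
      = pvMembers ad c := by
  have h1 : ad.foldl (fun g p => g.modify (pvB_nameKey p.1) [] (fun ms => ms ++ [p])) (PySem.Dict.mk [])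
      = (ad.map (fun p => (pvB_nameKey p.1, p))).foldl (fun g q => q.2 |> fun _ => g.modify q.1 [] (fun ms => ms ++ [q.2])) (PySem.Dict.mk []) := by
    rw [List.foldl_map]
  rw [h1]
  rw [PySem.Dict.getD_foldl_modify_append]
  rw [List.filter_map]
  simp only [List.map_map]
  rw [show (PySem.Dict.mk ([] : List (List String × List (String × List String)))).getD c [] = [] from rfl]
  simp only [List.nil_append]
  unfold pvMembers
  rw [show ((fun (q : List String × (String × List String)) => q.1 == c) ∘ (fun p => (pvB_nameKey p.1, p)))
        = (fun p => pvB_nameKey p.1 == c) from rfl]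
  rw [show ((fun (x : List String × (String × List String)) => x.2) ∘ (fun p => (pvB_nameKey p.1, p))) = id from rfl]
  simp

theorem pvSliceDropLast (xs : List (String × List String)) (x : String × List String) :
    PySem.List.slice (xs ++ [x]) none (some (-1)) = xs := by
  simp [PySem.List.slice, PySem.List.clampIdx]

theorem pvEmit_append (xs : List (String × List String)) (k : String) (v : List String) :
    pvEmit (xs ++ [(k, v)]) = (k, xs.foldl (fun s q => PySem.Set.union s q.2) v) := by
  unfold pvEmit
  rw [PySem.List.pyGetD_neg_one_append_singleton, pvSliceDropLast]

theorem pvTargetCons (init : List (String × List String)) (k : String) (v : List String) :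
    pvTarget (init ++ [(k, v)])
      = pvEmit (pvMembers (init ++ [(k, v)]) (pvB_nameKey k))
          :: pvTarget (init.filter (fun p => !(pvB_nameKey p.1 == pvB_nameKey k))) := by
  set c := pvB_nameKey k with hc
  unfold pvTarget
  have h1 : ((init ++ [(k, v)]).reverse.map (fun p => pvB_nameKey p.1)) = c :: init.reverse.map (fun p => pvB_nameKey p.1) := by
    simp [hc]
  rw [h1]
  have h2 : PySem.List.dedup (c :: init.reverse.map (fun p => pvB_nameKey p.1))
      = c :: (PySem.List.dedup (init.reverse.map (fun p => pvB_nameKey p.1))).filter (fun y => !(y == c)) := by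
    simp only [PySem.List.dedup, PySem.Set.ofList_cons, PySem.Set.discard]
  rw [h2, List.map_cons]
  congr 1
  -- tail index lists agree
  have h3 : ((init.filter (fun p => !(pvB_nameKey p.1 == c))).reverse.map (fun p => pvB_nameKey p.1))
      = (init.reverse.map (fun p => pvB_nameKey p.1)).filter (fun y => !(y == c)) := by
    rw [← List.filter_reverse, List.filter_map]; rfl
  rw [h3, show PySem.List.dedup ((init.reverse.map (fun p => pvB_nameKey p.1)).filter (fun y => !(y == c)))
        = (PySem.List.dedup (init.reverse.map (fun p => pvB_nameKey p.1))).filter (fun y => !(y == c)) from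
      pvOfListFilter _ _]
  apply List.map_congr_left
  intro c' hc'
  have hne : (c' == c) = false := by
    have := List.of_mem_filter hc'; simpa using this
  have hm1 : pvMembers (init ++ [(k, v)]) c' = pvMembers init c' := by
    unfold pvMembers
    rw [List.filter_append]
    have hcc : ¬ c = c' := fun h => by subst h; simp at hne
    have hkc : (pvB_nameKey (k, v).1 == c') = false := beq_eq_false_iff_ne.mpr (fun h => hcc (hc ▸ h))
    simp [hkc]
  have hm2 : pvMembers (init.filter (fun p => !(pvB_nameKey p.1 == c))) c' = pvMembers init c' := by
    unfold pvMembers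
    rw [List.filter_filter]
    apply List.filter_congr
    intro p _
    by_cases hp : pvB_nameKey p.1 = c'
    · simp [hp, hne]
    · simp [hp]
  rw [hm1, hm2]

theorem pvMembers_mem_props (ad : List (String × List String)) (nm : List String)
    (h : nm ∈ PySem.List.dedup (ad.reverse.map (fun p => pvB_nameKey p.1))) :
    ∃ e ∈ ad, e.1 = (pvEmit (pvMembers ad nm)).1 ∧ pvB_nameKey e.1 = nm := by
  have hmem : nm ∈ ad.reverse.map (fun p => pvB_nameKey p.1) := by
    simp only [PySem.List.dedup] at h; exact (PySem.Set.mem_ofList _ _).mp h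
  obtain ⟨p, hp, hpk⟩ := List.mem_map.mp hmem
  have hp' : p ∈ ad := List.mem_reverse.mp hp
  have hne : pvMembers ad nm ≠ [] := by
    apply List.ne_nil_of_mem (a := p)
    exact List.mem_filter.mpr ⟨hp', by simp [hpk]⟩
  unfold pvEmit
  rw [PySem.List.pyGetD_neg_one _ _ hne]
  have hl : (pvMembers ad nm).getLast hne ∈ pvMembers ad nm := List.getLast_mem hne
  have := List.mem_filter.mp hl
  exact ⟨_, this.1, rfl, by simpa using this.2⟩

theorem pvBtarget (ad : List (String × List String)) (hnd : (ad.map Prod.fst).Nodup) :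
    compare_and_merge_keys_alt ad = pvTarget ad := by
  unfold compare_and_merge_keys_alt
  simp only
  have hstep : (fun (m : PySem.Dict String (List String)) nm =>
      let members := (ad.foldl (fun g p => g.modify (pvB_nameKey p.1) [] (fun ms => ms ++ [p])) (PySem.Dict.mk [])).getD nm []
      let last := PySem.List.pyGetD members (-1) ("", [])
      let merged_books := (PySem.List.slice members none (some (-1))).foldl
        (fun s q => PySem.Set.union s q.2) last.2
      m.insert last.1 merged_books)
      = (fun (m : PySem.Dict String (List String)) nm =>
        m.insert (pvEmit (pvMembers ad nm)).1 (pvEmit (pvMembers ad nm)).2) := by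
    funext m nm
    simp only [pvGroupsGetD]
    rfl
  rw [hstep]
  set order := PySem.List.dedup (ad.reverse.map (fun p => pvB_nameKey p.1)) with horder
  have hfresh : ∀ nm ∈ order, (PySem.Dict.mk ([] : List (String × List String))).contains (pvEmit (pvMembers ad nm)).1 = false := by
    intro nm _; rfl
  have hkn : (order.map (fun nm => (pvEmit (pvMembers ad nm)).1)).Nodup := by
    apply List.Nodup.map_on
    · intro x hx y hy hxy
      obtain ⟨e, he, hek, hex⟩ := pvMembers_mem_props ad x hx
      obtain ⟨e', he', hek', hex'⟩ := pvMembers_mem_props ad y hy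
      have : e = e' := List.inj_on_of_nodup_map hnd he he' (by rw [hek, hek']; exact hxy)
      rw [← hex, ← hex', this]
    · exact PySem.List.nodup_dedup _
  have := PySem.Dict.items_foldl_insert_fresh order
    (fun nm => (pvEmit (pvMembers ad nm)).1) (fun nm => (pvEmit (pvMembers ad nm)).2)
    (PySem.Dict.mk []) hfresh hkn
  simp only at this
  rw [this]
  unfold pvTarget
  rw [← horder]
  simp

-- termination helpers for the while-loop of A (cited by decreasing_by)

theorem pvAgoItems (n : Nat) : ∀ (d : List (String × List String)) (acc : PySem.Dict String (List String)),
    d.length ≤ n → (d.map Prod.fst).Nodup → (∀ p ∈ d, acc.contains p.1 = false) →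
    (pvA_go (PySem.Dict.mk d) acc).items = acc.items ++ pvTarget d := by
  induction n with
  | zero =>
    intro d acc hlen _ _
    have hd : d = [] := List.eq_nil_of_length_eq_zero (Nat.le_zero.mp hlen)
    subst hd
    rw [pvA_go.eq_def]
    simp [pvTarget, PySem.List.dedup]
  | succ n ih =>
    intro d acc hlen hnd hacc
    rcases List.eq_nil_or_concat d with rfl | ⟨init, ⟨k, v⟩, rfl⟩
    · rw [pvA_go.eq_def]; simp [pvTarget, PySem.List.dedup]
    · rw [List.concat_eq_append] at *
      set c := pvB_nameKey k with hc
      rw [pvA_go.eq_def]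
      have hlast : (PySem.Dict.mk (init ++ [(k, v)])).items.getLast? = some (k, v) := by
        simp
      rw [hlast]
      simp only
      have hdrop : (init ++ [(k, v)]).dropLast = init := by simp
      rw [hdrop]
      have hkeys : (PySem.Dict.mk init).keys = init.map Prod.fst := rfl
      have hmatch : List.filter (fun key2 => (pvA_lastNames key2).equal (pvA_lastNames k)) (PySem.Dict.mk init).keys
          = (pvMembers init c).map Prod.fst := by
        rw [hkeys, List.filter_map]
        unfold pvMembers
        congr 1
        apply List.filter_congr
        intro p _
        simp only [Function.comp_apply]
        rw [pvKeyeq, ← hc]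
      rw [hmatch]
      -- facts from Nodup
      have hnd' : (init.map Prod.fst).Nodup ∧ k ∉ init.map Prod.fst := by
        rw [List.map_append] at hnd
        simp only [List.map_cons, List.map_nil] at hnd
        have h1 := List.Nodup.of_append_left hnd
        have h2 := List.disjoint_of_nodup_append hnd
        exact ⟨h1, fun hk => h2 hk (by simp)⟩
      have hmemd : pvMembers (init ++ [(k, v)]) c = pvMembers init c ++ [(k, v)] := by
        unfold pvMembers
        rw [List.filter_append]
        simp [← hc]
      have hemit : pvEmit (pvMembers (init ++ [(k, v)]) c)
          = (k, (pvMembers init c).foldl (fun s q => PySem.Set.union s q.2) v) := by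
        rw [hmemd, pvEmit_append]
      -- common continuation
      have hcont : ∀ u, u = (pvMembers init c).foldl (fun s q => PySem.Set.union s q.2) v →
          (pvA_go (PySem.Dict.mk (init.filter (fun p => !(pvB_nameKey p.1 == c)))) (acc.insert k u)).items
            = acc.items ++ pvTarget (init ++ [(k, v)]) := by
        intro u hu
        have hins : (acc.insert k u).items = acc.items ++ [(k, u)] :=
          PySem.Dict.items_insert_of_not_contains _ _ (hacc (k, v) (by simp))
        have hih := ih (init.filter (fun p => !(pvB_nameKey p.1 == c))) (acc.insert k u)
          (le_trans (List.length_filter_le _ _) (by simp at hlen; omega))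
          ((hnd'.1).sublist (List.Sublist.map Prod.fst List.filter_sublist))
          (by
            intro p hp
            have hpi : p ∈ init := List.mem_of_mem_filter hp
            rw [PySem.Dict.contains_insert]
            have h1 : acc.contains p.1 = false := hacc p (by simp [hpi])
            have h2 : (p.1 == k) = false := by
              apply beq_eq_false_iff_ne.mpr
              intro he
              exact hnd'.2 (he ▸ List.mem_map_of_mem hpi)
            rw [h1, h2]
            rfl)
        rw [hih, hins, pvTargetCons, ← hc, hemit, hu]
        simp
      by_cases hm : pvMembers init c = []
      · rw [if_neg (by simp [hm])]
        have hfe : init.filter (fun p => !(pvB_nameKey p.1 == c)) = init := by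
          apply List.filter_eq_self.mpr
          intro p hp
          simp only [Bool.not_eq_eq_eq_not, Bool.not_true]
          by_contra hb
          have : (pvB_nameKey p.1 == c) = true := by
            cases hq : (pvB_nameKey p.1 == c) with
            | true => rfl
            | false => exact absurd hq hb
          exact (List.ne_nil_of_mem (List.mem_filter.mpr ⟨hp, this⟩)) hm
        have := hcont v (by rw [hm]; rfl)
        rw [hfe] at this
        exact this
      · rw [if_pos (by simpa using hm)]
        -- the erased dict
        have herase : (((pvMembers init c).map Prod.fst).foldl (fun dd key => dd.erase key) (PySem.Dict.mk init))
            = PySem.Dict.mk (init.filter (fun p => !(pvB_nameKey p.1 == c))) := by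
          apply PySem.Dict.ext
          rw [pvFoldlErase]
          apply List.filter_congr
          intro p hp
          congr 1
          rw [List.contains_eq_mem]
          cases hq : (pvB_nameKey p.1 == c) with
          | true =>
            simp only [decide_eq_true_eq]
            have : p ∈ pvMembers init c := List.mem_filter.mpr ⟨hp, hq⟩
            simp [List.mem_map]
            exact ⟨p.2, by rcases p with ⟨a, b⟩; exact this⟩
          | false =>
            simp only [decide_eq_false_iff_not]
            intro hmem
            obtain ⟨q, hq1, hq2⟩ := List.mem_map.mp hmem
            have hqi : q ∈ init := List.mem_of_mem_filter hq1
            have : q = p := List.inj_on_of_nodup_map hnd'.1 hqi hp hq2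
            subst this
            have := (List.mem_filter.mp hq1).2
            rw [hq] at this
            exact absurd this (by simp)
        have hfold : (((pvMembers init c).map Prod.fst).foldl
              (fun s key => PySem.Set.union s ((PySem.Dict.mk init).getD key [])) v)
            = (pvMembers init c).foldl (fun s q => PySem.Set.union s q.2) v := by
          rw [List.foldl_map]
          apply PySem.List.foldl_congr_mem
          intro s q hq
          congr 1
          exact PySem.Dict.getD_of_mem_items (PySem.Dict.mk init) (List.mem_of_mem_filter hq) hnd'.1 []
        rw [herase, hfold]
        exact hcont _ rfl

-- ===== VERDICT (by name: the statement is the Claim_ definition above) =====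
theorem compare_and_merge_keys_spec : Claim_equal_compare_and_merge_keys := by
  intro ad _hdom hpre
  unfold Spec_compare_and_merge_keys
  rw [pvBtarget ad hpre.1]
  have := pvAgoItems ad.length ad (PySem.Dict.mk []) le_rfl hpre.1
    (by intro p _; simp [PySem.Dict.contains])
  simpa [compare_and_merge_keys] using this
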